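-- pv_equiv track=rewrite | github.com/Nekonardo/problem_solution | task_a_steps_calculation.py | value_at_n
-- ===== SOURCE A (Python) =====
-- def value_at_n(n, m):
--     if n <= 0 or n % 1 != 0:
--         raise Exception("Invalid input n, it must be a positive integer but it is: ", n)
--
--     if m <= 0 or m % 1 != 0:
--         raise Exception("Invalid input m, it must be a positive integer but it is: ", m)
--
--     if n == 1:  # recursion terminating condition
--         return m
--
--     last_element_in_sequence = value_at_n(n - 1, m)
--
--     if last_element_in_sequence % 2 == 0:
--         return int(last_element_in_sequence / 2)
--     else:
--         return int((last_element_in_sequence * 3) + 1)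
-- ===== SOURCE B (Python) =====
-- def value_at_n(n, m):
--     if n <= 0 or n % 1 != 0:
--         raise Exception("Invalid input n, it must be a positive integer but it is: ", n)
--
--     if m <= 0 or m % 1 != 0:
--         raise Exception("Invalid input m, it must be a positive integer but it is: ", m)
--
--     cur = m
--     for _ in range(int(n) - 1):
--         if cur % 2 == 0:
--             cur = int(cur / 2)   # keep float division to match A's exact numeric behaviour
--         else:
--             cur = int(cur * 3 + 1)
--     return cur
-- ===== Notes on version B (the rewrite author's own statement) =====
-- stated objective: idiomatic
-- what changed: Replaces A's depth-n recursion (one stack frame per step) with a single iterative loop running int(n)-1 Collatz steps on an accumulator, keeping A's validation and exact int(cur/2) step.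
import Mathlib
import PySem

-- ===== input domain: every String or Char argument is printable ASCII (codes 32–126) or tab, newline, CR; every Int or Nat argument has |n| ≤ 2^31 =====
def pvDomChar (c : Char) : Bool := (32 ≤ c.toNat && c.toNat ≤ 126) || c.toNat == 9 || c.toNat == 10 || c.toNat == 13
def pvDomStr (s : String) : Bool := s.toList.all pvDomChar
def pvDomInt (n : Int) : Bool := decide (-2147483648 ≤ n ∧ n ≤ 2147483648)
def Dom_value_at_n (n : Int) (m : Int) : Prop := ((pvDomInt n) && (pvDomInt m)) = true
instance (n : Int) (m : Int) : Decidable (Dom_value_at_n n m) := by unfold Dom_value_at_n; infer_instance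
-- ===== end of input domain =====

-- B replaces A's recursion (one stack frame per step) by a single iterative fold: same
-- validation and step rule, different decomposition (loop instead of recursion).

-- Shared float-semantics helper: Python's `int(x/2)` for even x equals the integer x/2
-- rounded to the nearest IEEE-754 double (ties to even).  `pyFloatInt k` is that rounding
-- of an integer k; exact for |k| < 2^53, otherwise round-to-nearest-even at 53 bits.
def pyFloatInt (k : Int) : Int :=
  let a := k.natAbs
  if a < 2 ^ 53 then k
  else
    let e := a.log2 - 52          -- a.log2 = bit_length - 1, so 2^52 ≤ a / 2^e < 2^53
    let q := a / 2 ^ e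
    let r := a % 2 ^ e
    let h := 2 ^ (e - 1)
    let q' := if h < r ∨ (r = h ∧ q % 2 = 1) then q + 1 else q
    if k < 0 then -(q' * 2 ^ e : Nat) else (q' * 2 ^ e : Nat)

-- ===== PORT A =====
-- A raises on n ≤ 0 or m ≤ 0 (excluded by Pre_); for n = 1 it returns m, otherwise it
-- recurses on n-1 and applies one Collatz step.  `int(last/2)` (float division) is ported
-- exactly via pyFloatInt; `last % 2` is Python's mod (= Int.emod, divisor positive).
def value_at_n (n : Int) (m : Int) : Int :=
  if n ≤ 1 then m
  else
    let last := value_at_n (n - 1) m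
    if PySem.Int.mod last 2 == 0 then pyFloatInt (PySem.Int.floordiv last 2)
    else last * 3 + 1
termination_by n.toNat
decreasing_by omega

-- ===== PORT B =====
def collatzStep (cur : Int) : Int :=
  if PySem.Int.mod cur 2 == 0 then pyFloatInt (PySem.Int.floordiv cur 2)
  else cur * 3 + 1

-- B: cur = m, then int(n)-1 iterations of the step; the validation raises are Pre_'s.
def value_at_n_alt (n : Int) (m : Int) : Int :=
  (List.range (n - 1).toNat).foldl (fun cur _ => collatzStep cur) m

-- ===== PRECONDITION & SPEC =====
-- A raises Exception("Invalid input …") exactly when n ≤ 0 or m ≤ 0 (n, m are ints here,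
-- so the `% 1 != 0` checks never fire); Pre_ excludes exactly those inputs.
def Pre_value_at_n (n : Int) (m : Int) : Prop := 1 ≤ n ∧ 1 ≤ m
instance (n : Int) (m : Int) : Decidable (Pre_value_at_n n m) := by unfold Pre_value_at_n; infer_instance
def pvWitness_value_at_n : Int × Int := (6, 7)

def Spec_value_at_n (n : Int) (m : Int) (out : Int) : Prop := out = value_at_n_alt n m
instance (n : Int) (m : Int) (out : Int) : Decidable (Spec_value_at_n n m out) := by unfold Spec_value_at_n; infer_instance

-- ===== CLAIM (what is proved, stated in full; the proofs are below) =====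
def Claim_equal_value_at_n : Prop := ∀ (n : Int) (m : Int), Dom_value_at_n n m → Pre_value_at_n n m → Spec_value_at_n n m (value_at_n n m)

-- ===== LEMMAS AND PROOFS =====

lemma alt_range_succ (k : Nat) (m : Int) :
    (List.range (k + 1)).foldl (fun cur _ => collatzStep cur) m
      = collatzStep ((List.range k).foldl (fun cur _ => collatzStep cur) m) := by
  simp [List.range_succ]

lemma value_at_n_eq_fold (k : Nat) (m : Int) :
    value_at_n ((k : Int) + 1) m = (List.range k).foldl (fun cur _ => collatzStep cur) m := by
  induction k with
  | zero => simp [value_at_n]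
  | succ k ih =>
    rw [value_at_n]
    push_cast
    have hne : ¬ ((k : Int) + 1 + 1 ≤ 1) := by omega
    rw [if_neg hne]
    have harg : ((k : Int) + 1 + 1 - 1) = (k : Int) + 1 := by ring
    rw [harg, ih, alt_range_succ]
    rfl

-- ===== VERDICT (by name: the statement is the Claim_ definition above) =====
theorem value_at_n_spec : Claim_equal_value_at_n := by
  intro n m _ hpre
  unfold Spec_value_at_n value_at_n_alt
  obtain ⟨hn, _⟩ := hpre
  have hk : n = ((n - 1).toNat : Int) + 1 := by omega
  rw [hk, value_at_n_eq_fold]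
  norm_num
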